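-- pv_equiv track=rewrite | github.com/lorenz0890/paithon | src/paithon/serializers.py | normalize_redaction_tokens
-- ===== SOURCE A (Python) =====
-- from typing import Any, Callable, List, Optional, Tuple
--
-- def normalize_redaction_tokens(values) -> Tuple[str, ...]:
--     return tuple(
--         sorted(
--             {
--                 str(value).strip().lower()
--                 for value in (values or ())
--                 if str(value).strip()
--             }
--         )
--     )
-- ===== SOURCE B (Python) =====
-- def normalize_redaction_tokens(values):
--     normalized = []
--     for v in (values or ()):
--         s = str(v).strip()
--         if s:
--             normalized.append(s.lower())
--     normalized.sort()
--     out = []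
--     prev = None
--     for s in normalized:
--         if s != prev:
--             out.append(s)
--             prev = s
--     return tuple(out)
-- ===== Notes on version B (the rewrite author's own statement) =====
-- stated objective: alternative
-- what changed: B collects the normalized strings with duplicates, sorts the list, and removes adjacent duplicates in one pass with a previous-element cursor, instead of A's hash-set comprehension followed by sorted().
import Mathlib
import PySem

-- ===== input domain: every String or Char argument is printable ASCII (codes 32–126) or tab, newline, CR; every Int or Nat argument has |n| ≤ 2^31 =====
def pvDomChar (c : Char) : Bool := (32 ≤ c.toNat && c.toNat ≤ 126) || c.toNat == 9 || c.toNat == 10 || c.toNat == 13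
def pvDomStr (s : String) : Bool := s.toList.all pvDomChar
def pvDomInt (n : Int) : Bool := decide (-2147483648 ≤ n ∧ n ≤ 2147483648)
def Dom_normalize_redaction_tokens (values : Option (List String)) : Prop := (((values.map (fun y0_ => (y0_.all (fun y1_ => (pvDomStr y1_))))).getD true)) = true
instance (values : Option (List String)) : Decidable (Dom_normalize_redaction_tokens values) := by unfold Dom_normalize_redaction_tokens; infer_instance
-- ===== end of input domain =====

-- B replaces A's hash-set comprehension + sorted() with sort-then-adjacent-dedup (alternative algorithm, same cost).

-- ===== PORT A =====
-- tuple(sorted({str(v).strip().lower() for v in (values or ()) if str(v).strip()}))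
def normalize_redaction_tokens (values : Option (List String)) : List String :=
  let vs := values.getD []
  PySem.List.sorted
    (PySem.Set.ofList
      ((vs.filter (fun v => PySem.Str.strip v != "")).map
        (fun v => PySem.Str.lower (PySem.Str.strip v))))
    (fun x => x) false

-- ===== PORT B =====
def normalize_redaction_tokens_alt (values : Option (List String)) : List String :=
  let normalized := (values.getD []).foldl
    (fun acc v =>
      if PySem.Str.strip v != "" then acc ++ [PySem.Str.lower (PySem.Str.strip v)] else acc) []
  let srt := PySem.List.sorted normalized (fun x => x) false
  (srt.foldl (fun st s => if st.2 == some s then st else (st.1 ++ [s], some s))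
    (([] : List String), (none : Option String))).1

-- ===== PRECONDITION & SPEC =====
def Spec_normalize_redaction_tokens (values : Option (List String)) (out : List String) : Prop := out = normalize_redaction_tokens_alt values
instance (values : Option (List String)) (out : List String) : Decidable (Spec_normalize_redaction_tokens values out) := by unfold Spec_normalize_redaction_tokens; infer_instance

-- ===== CLAIM (what is proved, stated in full; the proofs are below) =====
def Claim_equal_normalize_redaction_tokens : Prop := ∀ (values : Option (List String)), Dom_normalize_redaction_tokens values → Spec_normalize_redaction_tokens values (normalize_redaction_tokens values)

-- ===== LEMMAS AND PROOFS =====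

-- reference form of B's dedup loop
def dedupAdj : List String → Option String → List String
  | [], _ => []
  | x :: xs, p => if p == some x then dedupAdj xs p else x :: dedupAdj xs (some x)

theorem foldl_dedupAdj (l : List String) (acc : List String) (p : Option String) :
    (l.foldl (fun st s => if st.2 == some s then st else (st.1 ++ [s], some s)) (acc, p)).1
      = acc ++ dedupAdj l p := by
  induction l generalizing acc p with
  | nil => simp [dedupAdj]
  | cons x xs ih =>
    by_cases h : p = some x
    · subst h
      simp only [List.foldl_cons, beq_self_eq_true, if_true, dedupAdj, ih]
    · have hb : (p == some x) = false := by simp [h]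
      simp only [List.foldl_cons, hb, Bool.false_eq_true, if_false, dedupAdj, ih]
      simp

theorem dedupAdj_pairwise_mem (l : List String) (p : Option String)
    (hpw : l.Pairwise (· ≤ ·)) (hb : ∀ q, p = some q → ∀ x ∈ l, q ≤ x) :
    (dedupAdj l p).Pairwise (· < ·) ∧ ∀ x, x ∈ dedupAdj l p ↔ x ∈ l ∧ p ≠ some x := by
  induction l generalizing p with
  | nil => simp [dedupAdj]
  | cons x xs ih =>
    have hhead : ∀ y ∈ xs, x ≤ y := fun y hy => (List.pairwise_cons.1 hpw).1 y hy
    have htail : xs.Pairwise (· ≤ ·) := (List.pairwise_cons.1 hpw).2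
    by_cases h : p = some x
    · have hb' : ∀ q, p = some q → ∀ y ∈ xs, q ≤ y := by
        intro q hq y hy
        rw [h] at hq; cases hq; exact hhead y hy
      obtain ⟨pw', mem'⟩ := ih p htail hb'
      refine ⟨by simpa [dedupAdj, h] using pw', ?_⟩
      intro z
      rw [show dedupAdj (x :: xs) p = dedupAdj xs p by simp [dedupAdj, h], mem' z]
      constructor
      · rintro ⟨hz, hne⟩; exact ⟨List.mem_cons_of_mem _ hz, hne⟩
      · rintro ⟨hz, hne⟩
        rcases List.mem_cons.1 hz with rfl | hz
        · exact absurd h hne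
        · exact ⟨hz, hne⟩
    · have hb' : ∀ q, some x = some q → ∀ y ∈ xs, q ≤ y := by
        intro q hq y hy; cases hq; exact hhead y hy
      obtain ⟨pw', mem'⟩ := ih (some x) htail hb'
      have hd : dedupAdj (x :: xs) p = x :: dedupAdj xs (some x) := by
        have hbf : (p == some x) = false := by simp [h]
        simp [dedupAdj, hbf]
      constructor
      · rw [hd]
        refine List.pairwise_cons.2 ⟨?_, pw'⟩
        intro y hy
        obtain ⟨hyxs, hyne⟩ := (mem' y).1 hy
        exact lt_of_le_of_ne (hhead y hyxs) (fun he => hyne (by rw [he]))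
      · intro z
        rw [hd]
        constructor
        · intro hz
          rcases List.mem_cons.1 hz with rfl | hz
          · exact ⟨List.mem_cons_self, fun he => h he⟩
          · obtain ⟨hzxs, hzne⟩ := (mem' z).1 hz
            refine ⟨List.mem_cons_of_mem _ hzxs, ?_⟩
            intro hpz
            obtain ⟨q, hq⟩ : ∃ q, p = some q := ⟨z, hpz⟩
            have hq1 : q ≤ x := hb q hq x List.mem_cons_self
            have hq2 : x ≤ z := hhead z hzxs
            rw [hq] at hpz
            cases hpz
            exact h (by rw [hq, le_antisymm hq1 hq2])
        · rintro ⟨hz, hne⟩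
          rcases List.mem_cons.1 hz with rfl | hz
          · exact List.mem_cons_self
          · by_cases hzx : z = x
            · subst hzx; exact List.mem_cons_self
            · exact List.mem_cons_of_mem _ ((mem' z).2 ⟨hz, fun he => hzx ((Option.some.inj he).symm)⟩)

theorem sorted_set_eq_dedupAdj_sorted (ns : List String) :
    PySem.List.sorted (PySem.Set.ofList ns) (fun x => x) false
      = dedupAdj (PySem.List.sorted ns (fun x => x) false) none := by
  set s := PySem.List.sorted ns (fun x => x) false with hs
  have hpw : s.Pairwise (· ≤ ·) := by
    simpa using PySem.List.sorted_pairwise (xs := ns) (key := fun x => x)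
  obtain ⟨pw', mem'⟩ := dedupAdj_pairwise_mem s none hpw (by intro q hq; cases hq)
  apply PySem.List.sorted_eq_of_perm_of_pairwise_lt
  · refine (List.perm_ext_iff_of_nodup (l₂ := PySem.Set.ofList ns) ?_ (PySem.Set.nodup_ofList _)).2 ?_
    · exact pw'.imp (fun h => ne_of_lt h)
    · intro a
      rw [mem' a]
      simp [PySem.Set.mem_ofList, hs, PySem.List.mem_sorted]
  · simpa using pw'

-- ===== VERDICT (by name: the statement is the Claim_ definition above) =====
theorem normalize_redaction_tokens_spec : Claim_equal_normalize_redaction_tokens := by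
  intro values _
  unfold Spec_normalize_redaction_tokens normalize_redaction_tokens normalize_redaction_tokens_alt
  simp only [PySem.List.foldl_append_if, List.nil_append, foldl_dedupAdj]
  rw [sorted_set_eq_dedupAdj_sorted]
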